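-- pv_equiv track=rewrite | github.com/Starry-Wing/mygit-test | scripts/checkstick.py | check
-- ===== SOURCE A (Python) =====
-- def check(n):
--     if n==1:
--         return 1
--     elif n>=2 and n<=6:
--         return 0
--     elif n>=7 and n<=11:
--         for m in range(2,11):
--             if check(n-m)==1:
--                return check(n-m)
--         return check(n-m)
--     else:
--         for j in range(10,1,-1):
--             if check(n-j)==1:
--                return check(n-j)
--         return check(n-j)
-- ===== SOURCE B (Python) =====
-- def check(n):
--     # Closed form: the losing positions are exactly n in 2..6; n == 1 and every n >= 7 win.
--     return 1 if n == 1 or n >= 7 else 0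
-- ===== Notes on version B (the rewrite author's own statement) =====
-- stated objective: faster
-- what changed: Replaced the recursion (which recomputes check(n-m) on return, exponential blow-up) with the closed form 1 if n==1 or n>=7 else 0; intended as faster (one a timing run measured 69x at n=64 with A timing out from n=256; another found A under the 5 ms floor at the largest size both finish).
-- outside the precondition, e.g. on check(0): A raises RecursionError, B returns 0
import Mathlib
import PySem

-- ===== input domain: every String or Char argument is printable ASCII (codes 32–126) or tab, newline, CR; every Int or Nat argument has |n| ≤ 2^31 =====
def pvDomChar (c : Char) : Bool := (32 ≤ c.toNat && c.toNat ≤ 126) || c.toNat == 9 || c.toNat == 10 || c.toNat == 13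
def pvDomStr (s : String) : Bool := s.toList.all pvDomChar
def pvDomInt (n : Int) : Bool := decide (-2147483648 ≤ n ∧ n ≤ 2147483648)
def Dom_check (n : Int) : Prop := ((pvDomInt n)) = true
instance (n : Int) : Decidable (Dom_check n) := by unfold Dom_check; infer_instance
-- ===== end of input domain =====

-- B replaces A's recursion (which recomputes check(n-m) on return) with the closed form
-- 1 if n==1 or n>=7 else 0; intended as faster. Equal wherever A returns (n >= 1).

-- ===== PORT A =====
-- Fuel makes A's recursion total in Lean; on Pre_check the fuel n.toNat + 1 is never
-- exhausted (proved below), so checkFuel follows A's code step for step there.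
mutual
  def checkFuel : Nat → Int → Int
    | 0, _ => 0   -- fuel exhaustion only outside Pre_check (A recurses forever there)
    | f + 1, n =>
      if n = 1 then 1
      else if 2 ≤ n ∧ n ≤ 6 then 0
      else if 7 ≤ n ∧ n ≤ 11 then
        -- for m in range(2,11): …  ; after the loop m is left at 10
        checkLoop f n [2, 3, 4, 5, 6, 7, 8, 9, 10] 10
      else
        -- for j in range(10,1,-1): … ; after the loop j is left at 2
        checkLoop f n [10, 9, 8, 7, 6, 5, 4, 3, 2] 2
  termination_by f _ => (f, 0)
  -- the loop body: 'if check(n-m)==1: return check(n-m)' (recomputed, as in A), else next m;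
  -- when the loop falls through, 'return check(n-last)'
  def checkLoop : Nat → Int → List Int → Int → Int
    | f, n, [], last => checkFuel f (n - last)
    | f, n, m :: rest, last =>
      if checkFuel f (n - m) = 1 then checkFuel f (n - m) else checkLoop f n rest last
  termination_by f _ ms _ => (f, ms.length + 1)
end

def check (n : Int) : Int := checkFuel (n.toNat + 1) n

-- ===== PORT B =====
def check_alt (n : Int) : Int := if n = 1 ∨ 7 ≤ n then 1 else 0

-- ===== PRECONDITION & SPEC =====
-- Pre_check excludes exactly n <= 0, where Python A recurses forever down the else branch
-- and raises RecursionError.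
def Pre_check (n : Int) : Prop := 1 ≤ n
instance (n : Int) : Decidable (Pre_check n) := by unfold Pre_check; infer_instance
def pvWitness_check : Int := 7

def Spec_check (n : Int) (out : Int) : Prop := out = check_alt n
instance (n : Int) (out : Int) : Decidable (Spec_check n out) := by unfold Spec_check; infer_instance

-- ===== CLAIM (what is proved, stated in full; the proofs are below) =====
def Claim_equal_check : Prop := ∀ (n : Int), Dom_check n → Pre_check n → Spec_check n (check n)

-- ===== LEMMAS AND PROOFS =====

-- With enough fuel (f ≥ n) and n ≥ 1, A's recursion computes the closed form.
lemma checkFuel_correct (f : Nat) : ∀ n : Int, 1 ≤ n → n ≤ (f : Int) →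
    checkFuel f n = (if n = 1 ∨ 7 ≤ n then 1 else 0) := by
  induction f using Nat.strong_induction_on with
  | _ f ih =>
    intro n h1 hf
    match f with
    | 0 => omega
    | f' + 1 =>
      have ihf : ∀ m : Int, 1 ≤ m → m ≤ (f' : Int) →
          checkFuel f' m = (if m = 1 ∨ 7 ≤ m then 1 else 0) :=
        ih f' (Nat.lt_succ_self f')
      rw [checkFuel]
      by_cases e1 : n = 1
      · simp [e1]
      · by_cases e2 : 2 ≤ n ∧ n ≤ 6
        · rw [if_neg e1, if_pos e2, if_neg (by omega : ¬ (n = 1 ∨ 7 ≤ n))]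
        · rw [if_neg e1, if_neg e2]
          have hb : n - 1 ≤ (f' : Int) := by push_cast at hf ⊢; omega
          by_cases e3 : 7 ≤ n ∧ n ≤ 11
          · -- 7 ≤ n ≤ 11: enumerate the five cases; the loop finds 1
            rw [if_pos e3, if_pos (by omega : n = 1 ∨ 7 ≤ n)]
            have hn : n = 7 ∨ n = 8 ∨ n = 9 ∨ n = 10 ∨ n = 11 := by omega
            rcases hn with h | h | h | h | h
            · subst h; simp [checkLoop, ihf 5 (by norm_num) (by omega), ihf 4 (by norm_num) (by omega), ihf 3 (by norm_num) (by omega), ihf 2 (by norm_num) (by omega), ihf 1 (by norm_num) (by omega)]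
            · subst h; simp [checkLoop, ihf 6 (by norm_num) (by omega), ihf 5 (by norm_num) (by omega), ihf 4 (by norm_num) (by omega), ihf 3 (by norm_num) (by omega), ihf 2 (by norm_num) (by omega), ihf 1 (by norm_num) (by omega)]
            · subst h; simp [checkLoop, ihf 7 (by norm_num) (by omega)]
            · subst h; simp [checkLoop, ihf 8 (by norm_num) (by omega)]
            · subst h; simp [checkLoop, ihf 9 (by norm_num) (by omega)]
          · -- n ≥ 12: the downward loop finds 1
            rw [if_neg e3, if_pos (by omega : n = 1 ∨ 7 ≤ n)]
            by_cases h17 : 17 ≤ n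
            · -- first iteration: check(n-10) = 1
              have h10 : checkFuel f' (n - 10) = 1 := by
                rw [ihf (n - 10) (by omega) (by omega)]
                simp [show (7:Int) ≤ n - 10 by omega]
              simp [checkLoop, h10]
            · -- 12 ≤ n ≤ 16: enumerate
              have hn : n = 12 ∨ n = 13 ∨ n = 14 ∨ n = 15 ∨ n = 16 := by omega
              rcases hn with h | h | h | h | h
              · subst h; simp [checkLoop, ihf 2 (by norm_num) (by omega), ihf 3 (by norm_num) (by omega), ihf 4 (by norm_num) (by omega), ihf 5 (by norm_num) (by omega), ihf 6 (by norm_num) (by omega), ihf 7 (by norm_num) (by omega)]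
              · subst h; simp [checkLoop, ihf 3 (by norm_num) (by omega), ihf 4 (by norm_num) (by omega), ihf 5 (by norm_num) (by omega), ihf 6 (by norm_num) (by omega), ihf 7 (by norm_num) (by omega)]
              · subst h; simp [checkLoop, ihf 4 (by norm_num) (by omega), ihf 5 (by norm_num) (by omega), ihf 6 (by norm_num) (by omega), ihf 7 (by norm_num) (by omega)]
              · subst h; simp [checkLoop, ihf 5 (by norm_num) (by omega), ihf 6 (by norm_num) (by omega), ihf 7 (by norm_num) (by omega)]
              · subst h; simp [checkLoop, ihf 6 (by norm_num) (by omega), ihf 7 (by norm_num) (by omega)]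

-- ===== VERDICT (by name: the statement is the Claim_ definition above) =====
theorem check_spec : Claim_equal_check := by
  intro n _ hpre
  unfold Spec_check check check_alt
  rw [checkFuel_correct (n.toNat + 1) n hpre (by push_cast; omega)]
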